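-- pv_equiv track=rewrite | github.com/limerickcabin/AIS | packet.py | str2sixbit
-- ===== SOURCE A (Python) =====
-- def str2sixbit(str):
--     #convert string to six bit ascii
--     sixbit=0
--     for c in str:
--         sixbit=sixbit<<6
--         v=ord(c)
--         if v<64:
--             sixbit+=ord(c)
--         else:
--             sixbit+=ord(c)-64
--     return(sixbit)
-- ===== SOURCE B (Python) =====
-- def str2sixbit(str):
--     # positional weighted sum: each 6-bit digit shifted to its place, no Horner accumulator
--     n = len(str)
--     return sum(
--         (ord(c) if ord(c) < 64 else ord(c) - 64) * 64 ** (n - 1 - i)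
--         for i, c in enumerate(str)
--     )
-- ===== Notes on version B (the rewrite author's own statement) =====
-- stated objective: alternative
-- what changed: Replaces the Horner-style shift-and-accumulate loop by a direct positional sum: each character's 6-bit digit is multiplied by 64**(n-1-i) and the contributions are summed.
import Mathlib
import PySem

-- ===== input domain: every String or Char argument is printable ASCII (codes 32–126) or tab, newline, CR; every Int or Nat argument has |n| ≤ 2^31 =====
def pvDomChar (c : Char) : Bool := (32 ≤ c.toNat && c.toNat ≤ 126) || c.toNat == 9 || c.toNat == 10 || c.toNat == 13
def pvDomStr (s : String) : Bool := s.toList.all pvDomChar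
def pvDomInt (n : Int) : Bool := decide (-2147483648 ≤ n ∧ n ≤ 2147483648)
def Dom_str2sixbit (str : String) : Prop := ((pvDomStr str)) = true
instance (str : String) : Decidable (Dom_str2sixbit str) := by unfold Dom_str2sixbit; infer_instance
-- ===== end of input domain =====

-- ===== PORT A =====
-- Horner loop: sixbit = sixbit<<6 + (v if v<64 else v-64) for each char
def str2sixbit (str : String) : Int :=
  str.toList.foldl
    (fun sixbit c =>
      let sixbit := sixbit <<< (6 : Nat)
      let v : Int := c.toNat
      if v < 64 then sixbit + v else sixbit + (v - 64))
    0

-- ===== PORT B =====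
-- positional sum: digit(c_i) * 64^(n-1-i); the exponent n-1-i is ≥ 0 since i < n, so .toNat is exact
def str2sixbit_alt (str : String) : Int :=
  let l := str.toList
  let n : Int := l.length
  ((PySem.List.enumerate l).map
    (fun p => (if (p.2.toNat : Int) < 64 then (p.2.toNat : Int) else (p.2.toNat : Int) - 64)
              * (64 : Int) ^ (n - 1 - p.1).toNat)).sum

-- ===== PRECONDITION & SPEC =====
def Spec_str2sixbit (str : String) (out : Int) : Prop := out = str2sixbit_alt str
instance (str : String) (out : Int) : Decidable (Spec_str2sixbit str out) := by unfold Spec_str2sixbit; infer_instance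

-- ===== CLAIM (what is proved, stated in full; the proofs are below) =====
def Claim_equal_str2sixbit : Prop := ∀ (str : String), Dom_str2sixbit str → Spec_str2sixbit str (str2sixbit str)

-- ===== LEMMAS AND PROOFS =====

-- ===== VERDICT (by name: the statement is the Claim_ definition above) =====
def pvDigit (c : Char) : Int :=
  if (c.toNat : Int) < 64 then (c.toNat : Int) else (c.toNat : Int) - 64

theorem pv_altList (l : List Char) :
    ((PySem.List.enumerate l).map
      (fun p => (if (p.2.toNat : Int) < 64 then (p.2.toNat : Int) else (p.2.toNat : Int) - 64)
                * (64 : Int) ^ ((l.length : Int) - 1 - p.1).toNat)).sum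
    = l.foldl (fun sixbit c => sixbit * 64 + pvDigit c) 0 := by
  induction l using List.reverseRecOn with
  | nil => simp [PySem.List.enumerate]
  | append_singleton xs c ih =>
    rw [List.foldl_append, PySem.List.enumerate_append, List.map_append, List.sum_append]
    have hmap : ((PySem.List.enumerate xs 0).map
        (fun p => (if (p.2.toNat : Int) < 64 then (p.2.toNat : Int) else (p.2.toNat : Int) - 64)
                  * (64 : Int) ^ (((xs ++ [c]).length : Int) - 1 - p.1).toNat)).sum
        = 64 * ((PySem.List.enumerate xs 0).map
        (fun p => (if (p.2.toNat : Int) < 64 then (p.2.toNat : Int) else (p.2.toNat : Int) - 64)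
                  * (64 : Int) ^ ((xs.length : Int) - 1 - p.1).toNat)).sum := by
      rw [← List.sum_map_mul_left, List.map_congr_left]
      intro p hp
      obtain ⟨k, hk, rfl⟩ := (PySem.List.mem_enumerate_iff _ _ _).mp hp
      have hexp : (((xs ++ [c]).length : Int) - 1 - ((0 : Int) + k)).toNat
          = ((xs.length : Int) - 1 - ((0 : Int) + k)).toNat + 1 := by
        simp only [List.length_append, List.length_cons, List.length_nil]
        omega
      rw [hexp, pow_succ]
      ring
    rw [hmap, ih]
    simp [PySem.List.enumerate, pvDigit, List.length_append]
    ring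

theorem pv_shift (a : Int) : a <<< (6 : Nat) = a * 64 := by
  rw [Int.shiftLeft_eq]; norm_num

theorem str2sixbit_spec : Claim_equal_str2sixbit := by
  intro s _
  unfold Spec_str2sixbit str2sixbit str2sixbit_alt
  rw [pv_altList]
  have hstep : (fun (sixbit : Int) (c : Char) =>
      let sixbit := sixbit <<< (6 : Nat)
      let v : Int := c.toNat
      if v < 64 then sixbit + v else sixbit + (v - 64))
      = (fun (sixbit : Int) (c : Char) => sixbit * 64 + pvDigit c) := by
    funext a c
    simp only [pv_shift, pvDigit]
    split_ifs <;> ring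
  rw [hstep]
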